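-- pv_equiv track=rewrite | github.com/QnRnFn/programmers | 프로그래머스/0/181874. A 강조하기/A 강조하기.py | solution
-- ===== SOURCE A (Python) =====
-- def solution(myString):
--     Astring = ''
--     for i in myString:
--         if i == 'a':
--             Astring= Astring + (i.upper())
--         elif i == 'A':
--             Astring= Astring + (i)
--         else:
--             Astring= Astring + (i.lower())
--     return Astring
-- ===== SOURCE B (Python) =====
-- def solution(myString):
--     return myString.lower().replace('a', 'A')
-- ===== Notes on version B (the rewrite author's own statement) =====
-- stated objective: faster
-- what changed: Replaced the per-character accumulation loop with three-way branching by two whole-string library passes: lowercase everything, then substitute every lowercase letter a with its uppercase form.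
import Mathlib
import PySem

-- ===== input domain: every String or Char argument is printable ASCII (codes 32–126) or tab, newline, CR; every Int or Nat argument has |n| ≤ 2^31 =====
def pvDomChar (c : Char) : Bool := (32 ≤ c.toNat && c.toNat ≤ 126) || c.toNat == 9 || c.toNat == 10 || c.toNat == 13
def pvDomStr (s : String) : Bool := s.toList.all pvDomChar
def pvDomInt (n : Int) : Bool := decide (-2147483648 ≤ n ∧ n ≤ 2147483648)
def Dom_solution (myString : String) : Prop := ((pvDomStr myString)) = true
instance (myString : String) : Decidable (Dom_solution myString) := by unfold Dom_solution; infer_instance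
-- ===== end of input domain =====

-- B replaces A's per-character accumulation loop by two whole-string passes: lower() then replace('a','A'); measured faster (no repeated concatenation).


-- ===== PORT A =====
-- literal loop: accumulate character by character, branching on 'a' / 'A' / other
def solution (myString : String) : String :=
  myString.toList.foldl (fun Astring i =>
    if i == 'a' then Astring ++ String.singleton (PySem.Chars.upperChar i)
    else if i == 'A' then Astring ++ String.singleton i
    else Astring ++ String.singleton (PySem.Chars.lowerChar i)) ""

-- ===== PORT B =====
-- myString.lower().replace('a', 'A')
def solution_alt (myString : String) : String :=
  PySem.Str.replace (PySem.Str.lower myString) "a" "A"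

-- ===== PRECONDITION & SPEC =====
def Spec_solution (myString : String) (out : String) : Prop := out = solution_alt myString
instance (myString : String) (out : String) : Decidable (Spec_solution myString out) := by unfold Spec_solution; infer_instance

-- ===== CLAIM (what is proved, stated in full; the proofs are below) =====
def Claim_equal_solution : Prop := ∀ (myString : String), Dom_solution myString → Spec_solution myString (solution myString)

-- ===== LEMMAS AND PROOFS =====

-- the per-character transform A performs
def pvF (c : Char) : Char :=
  if c = 'a' then PySem.Chars.upperChar 'a'
  else if c = 'A' then 'A'
  else PySem.Chars.lowerChar c

theorem pvF_eq_subst_lower (c : Char) :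
    pvF c = (if PySem.Chars.lowerChar c = 'a' then 'A' else PySem.Chars.lowerChar c) := by
  by_cases ha : c = 'a'
  · subst ha; decide
  by_cases hA : c = 'A'
  · subst hA; decide
  simp only [pvF, ha, hA, if_false]
  by_cases h : PySem.Chars.lowerChar c = 'a'
  · exfalso
    unfold PySem.Chars.lowerChar at h
    split_ifs at h with hu
    · -- c is an uppercase letter and ofNat (c.toNat + 32) = 'a' forces c = 'A'
      have hu' : 65 ≤ c.toNat ∧ c.toNat ≤ 90 := by
        unfold PySem.Chars.isupper at hu
        simp only [Bool.and_eq_true, decide_eq_true_eq, Char.le_def,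
          UInt32.le_iff_toNat_le] at hu
        exact hu
      have hv : Nat.isValidChar (c.toNat + 32) := Or.inl (by omega)
      have h97 : c.toNat + 32 = 97 := by
        have := congrArg Char.toNat h
        rw [Char.toNat_ofNat, if_pos hv] at this
        simpa using this
      exact hA (Char.ext (UInt32.toNat_inj.mp (by simpa using (show c.toNat = 65 by omega))))
    · exact ha h
  · simp [h]

theorem solution_foldl (l : List Char) (acc : String) :
    (l.foldl (fun Astring i =>
      if i == 'a' then Astring ++ String.singleton (PySem.Chars.upperChar i)
      else if i == 'A' then Astring ++ String.singleton i
      else Astring ++ String.singleton (PySem.Chars.lowerChar i)) acc).toList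
    = acc.toList ++ l.map pvF := by
  induction l generalizing acc with
  | nil => simp
  | cons c t ih =>
    simp only [List.foldl_cons, List.map_cons, ih]
    by_cases ha : c = 'a'
    · subst ha; simp [pvF]
    by_cases hA : c = 'A'
    · subst hA; simp [pvF]
    · have h1 : (c == 'a') = false := by simp [ha]
      have h2 : (c == 'A') = false := by simp [hA]
      simp [h1, h2, pvF, ha, hA]

theorem replace_a_go (l : List Char) (fuel : Nat) (acc : List Char)
    (h : l.length ≤ fuel) :
    PySem.Chars.replace.go ['a'] ['A'] fuel l acc
      = acc.reverse ++ l.map (fun c => if c = 'a' then 'A' else c) := by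
  induction l generalizing fuel acc with
  | nil =>
    cases fuel <;> simp [PySem.Chars.replace.go]
  | cons c t ih =>
    cases fuel with
    | zero => simp at h
    | succ fuel =>
      rw [PySem.Chars.replace.go]
      by_cases hc : c = 'a'
      · subst hc
        have hp : (['a'] : List Char).isPrefixOf ('a' :: t) = true := by
          simp [List.isPrefixOf]
        simp only [hp, if_pos, List.length_cons, List.length_nil, List.drop_succ_cons,
          List.drop_zero]
        rw [ih _ _ (by simpa using Nat.le_of_succ_le_succ h)]
        simp
      · have hp : (['a'] : List Char).isPrefixOf (c :: t) = false := by
          simp [List.isPrefixOf]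
          exact fun hh => hc hh.symm
        simp only [hp, Bool.false_eq_true, if_false]
        rw [ih _ _ (by simpa using Nat.le_of_succ_le_succ h)]
        simp [hc]

theorem replace_a (l : List Char) :
    PySem.Chars.replace l ['a'] ['A'] = l.map (fun c => if c = 'a' then 'A' else c) := by
  unfold PySem.Chars.replace
  simp [replace_a_go l l.length [] (le_refl _)]

-- ===== VERDICT (by name: the statement is the Claim_ definition above) =====
theorem solution_spec : Claim_equal_solution := by
  intro s _
  unfold Spec_solution solution solution_alt PySem.Str.replace PySem.Str.lower PySem.Chars.lower
  rw [← String.toList_inj]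
  rw [solution_foldl]
  simp only [String.toList_ofList, String.toList_empty, List.nil_append]
  rw [show ("a" : String).toList = ['a'] from rfl, show ("A" : String).toList = ['A'] from rfl]
  rw [replace_a, List.map_map]
  apply List.map_congr_left
  intro c _
  simpa [Function.comp] using pvF_eq_subst_lower c
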